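-- pv_equiv track=rewrite | github.com/jaseer1984-ai/RECONCILATION | app.py | _find_by_alias
-- ===== SOURCE A (Python) =====
-- def _casefold(s: str) -> str: return s.strip().lower()
--
-- def _eq(a: str, b: str) -> bool: return _casefold(a) == _casefold(b)
--
-- OUR_ALIASES     = {"our book", "tosl", "ourbook", "our_book"}
--
-- BR_ALIASES      = {"branch book", "branch", "br", "branchbook", "branch_book"}
--
-- def _find_by_alias(target, names):
--     if not target: return None
--     t = _casefold(target)
--     for n in names:
--         if _eq(n, target): return n
--     if t in OUR_ALIASES:
--         for n in names:
--             if _casefold(n) in OUR_ALIASES: return n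
--     if t in BR_ALIASES:
--         for n in names:
--             if _casefold(n) in BR_ALIASES: return n
--     return None
-- ===== SOURCE B (Python) =====
-- def _casefold(s: str) -> str: return s.strip().lower()
--
-- OUR_ALIASES = {"our book", "tosl", "ourbook", "our_book"}
-- BR_ALIASES  = {"branch book", "branch", "br", "branchbook", "branch_book"}
--
-- def _find_by_alias(target, names):
--     # Single pass: pick the target's alias group once, then scan names once,
--     # returning on the first exact casefold match and remembering the first alias hit.
--     if not target:
--         return None
--     t = _casefold(target)
--     group = OUR_ALIASES if t in OUR_ALIASES else BR_ALIASES if t in BR_ALIASES else None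
--     alias_hit = None
--     for n in names:
--         cn = _casefold(n)
--         if cn == t:
--             return n
--         if alias_hit is None and group is not None and cn in group:
--             alias_hit = n
--     return alias_hit
-- ===== Notes on version B (the rewrite author's own statement) =====
-- stated objective: faster
-- what changed: Replaces A's up-to-three sequential scans (exact loop via _eq, which re-casefolds the target for every name, then OUR-alias loop, then BR-alias loop) with one pass that casefolds the target and resolves its alias group once, returns on the first exact match and remembers the first alias candidate as a fallback.
import Mathlib
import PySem

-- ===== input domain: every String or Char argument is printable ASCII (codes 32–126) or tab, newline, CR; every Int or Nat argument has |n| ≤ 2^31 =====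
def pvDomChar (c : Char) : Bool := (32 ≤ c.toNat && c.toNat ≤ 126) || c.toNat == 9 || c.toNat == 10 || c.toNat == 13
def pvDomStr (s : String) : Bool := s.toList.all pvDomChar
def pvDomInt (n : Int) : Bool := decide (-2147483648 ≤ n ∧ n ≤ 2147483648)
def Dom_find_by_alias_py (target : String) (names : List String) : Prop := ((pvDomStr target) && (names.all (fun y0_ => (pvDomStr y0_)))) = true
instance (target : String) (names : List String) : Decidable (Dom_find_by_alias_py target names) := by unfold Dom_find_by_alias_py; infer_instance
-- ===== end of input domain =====

-- B resolves the alias group once and makes a single pass (exact match returns, first alias hit is remembered) instead of A's three sequential scans; objective: alternative decomposition.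


-- shared module context: _casefold and the two alias sets
def pvCasefold (s : String) : String := PySem.Str.lower (PySem.Str.strip s)
def pvOUR : PySem.Set String := PySem.Set.ofList ["our book", "tosl", "ourbook", "our_book"]
def pvBR : PySem.Set String := PySem.Set.ofList ["branch book", "branch", "br", "branchbook", "branch_book"]

-- early 'return' inside a loop, modelled as first-some-wins
def pvFirst (x y : Option String) : Option String :=
  match x with
  | some n => some n
  | none => y

-- ===== PORT A =====
-- 'for n in names: if _eq(n, target): return n'  (_eq recomputes _casefold(target) each time)
def aExactLoop (target : String) : List String → Option String
  | [] => none
  | n :: ns => if pvCasefold n = pvCasefold target then some n else aExactLoop target ns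

-- 'for n in names: if _casefold(n) in g: return n'
def aAliasLoop (g : List String) : List String → Option String
  | [] => none
  | n :: ns => if g.contains (pvCasefold n) then some n else aAliasLoop g ns

def find_by_alias_py (target : String) (names : List String) : Option String :=
  if target = "" then none
  else
    let t := pvCasefold target
    pvFirst (aExactLoop target names)
      (pvFirst (if pvOUR.contains t then aAliasLoop pvOUR names else none)
        (if pvBR.contains t then aAliasLoop pvBR names else none))

-- ===== PORT B =====
-- single pass: return on exact match, remember the first alias hit in acc
def bLoop (t : String) (group : Option (List String)) : List String → Option String → Option String
  | [], acc => acc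
  | n :: ns, acc =>
    let cn := pvCasefold n
    if cn = t then some n
    else
      bLoop t group ns
        (if acc.isNone && (match group with | some g => g.contains cn | none => false)
         then some n else acc)

def find_by_alias_py_alt (target : String) (names : List String) : Option String :=
  if target = "" then none
  else
    let t := pvCasefold target
    let group : Option (List String) :=
      if pvOUR.contains t then some pvOUR
      else if pvBR.contains t then some pvBR
      else none
    bLoop t group names none

-- ===== PRECONDITION & SPEC =====
def Spec_find_by_alias_py (target : String) (names : List String) (out : Option String) : Prop := out = find_by_alias_py_alt target names
instance (target : String) (names : List String) (out : Option String) : Decidable (Spec_find_by_alias_py target names out) := by unfold Spec_find_by_alias_py; infer_instance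

-- ===== CLAIM (what is proved, stated in full; the proofs are below) =====
def Claim_equal_find_by_alias_py : Prop := ∀ (target : String) (names : List String), Dom_find_by_alias_py target names → Spec_find_by_alias_py target names (find_by_alias_py target names)

-- ===== LEMMAS AND PROOFS =====
-- the two alias sets are disjoint, so A runs at most one alias loop
theorem pv_disjoint (s : String) (h : pvOUR.contains s = true) : pvBR.contains s = false := by
  simp [pvOUR, PySem.Set.ofList, List.contains_eq_mem] at h
  rcases h with h | h | h | h <;> subst h <;> decide

-- the single pass with group g equals: first exact match, else acc, else first alias hit
theorem bLoop_some (target : String) (g : List String) (ns : List String) (acc : Option String) :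
    bLoop (pvCasefold target) (some g) ns acc
      = pvFirst (aExactLoop target ns) (pvFirst acc (aAliasLoop g ns)) := by
  induction ns generalizing acc with
  | nil => cases acc <;> rfl
  | cons n ns ih =>
    by_cases hx : pvCasefold n = pvCasefold target
    · simp [bLoop, aExactLoop, hx, pvFirst]
    · by_cases ha : g.contains (pvCasefold n)
      all_goals cases acc with
        | none =>
          simp only [bLoop, aExactLoop, aAliasLoop, hx, ih, pvFirst, if_false,
            Option.isNone_none, Bool.true_and]
          cases aExactLoop target ns <;>
            simp_all [pvFirst, List.contains_eq_mem]
        | some a =>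
          simp [bLoop, aExactLoop, hx, ih, pvFirst]

-- with no group, the accumulator never changes
theorem bLoop_none (target : String) (ns : List String) (acc : Option String) :
    bLoop (pvCasefold target) none ns acc = pvFirst (aExactLoop target ns) acc := by
  induction ns generalizing acc with
  | nil => cases acc <;> rfl
  | cons n ns ih =>
    by_cases hx : pvCasefold n = pvCasefold target
    · simp [bLoop, aExactLoop, hx, pvFirst]
    · simp [bLoop, aExactLoop, hx, ih]

-- ===== VERDICT (by name: the statement is the Claim_ definition above) =====
theorem find_by_alias_py_spec : Claim_equal_find_by_alias_py := by
  intro target names _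
  unfold Spec_find_by_alias_py find_by_alias_py find_by_alias_py_alt
  by_cases h0 : target = ""
  · simp [h0]
  · simp only [h0, if_false]
    by_cases hOur : pvCasefold target ∈ (pvOUR : List String)
    · have hBr : pvCasefold target ∉ (pvBR : List String) := by
        have := pv_disjoint _ (by simpa [List.contains_eq_mem] using hOur)
        simpa [List.contains_eq_mem] using this
      simp [hOur, hBr, bLoop_some]
      cases aExactLoop target names <;> cases aAliasLoop pvOUR names <;> rfl
    · by_cases hBr : pvCasefold target ∈ (pvBR : List String)
      · simp [hOur, hBr, bLoop_some]
      · simp [hOur, hBr, bLoop_none, pvFirst]
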